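-- pv_equiv track=rewrite | github.com/JustinZarb/natural_maps | src/streamlit_functions.py | count_tag_frequency_in_nodes
-- ===== SOURCE A (Python) =====
-- def add_value(tag_frequency, t, v):
--     if isinstance(v, str):
--         values = v.split(";")
--         for value in values:
--             if t in tag_frequency:
--                 if (
--                     value not in tag_frequency[t]
--                 ):  # Check if value is not already in the list
--                     tag_frequency[t].append(value)
--             else:
--                 tag_frequency[t] = [value]
--     else:
--         if t in tag_frequency:
--             if (
--                 str(v) not in tag_frequency[t]
--             ):  # Check if value is not already in the list
--                 tag_frequency[t].append(str(v))
--         else: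
--             tag_frequency[t] = [str(v)]
--     return tag_frequency
--
-- def count_tag_frequency_in_nodes(nodes, tag=None):
--     tag_frequency = {}
--
--     for node in nodes:
--         if "tags" in node:
--             for t, v in node["tags"].items():
--                 # Split the tag on the first separator
--                 t = t.split(":")[0]
--
--                 if tag is None:
--                     # Collecting unique values for each tag
--                     tag_frequency = add_value(tag_frequency, t, v)
--                 else:
--                     # Collecting unique values for a specific tag
--                     if t == tag:
--                         tag_frequency = add_value(tag_frequency, t, v)
--
--     return tag_frequency
-- ===== SOURCE B (Python) =====
-- def count_tag_frequency_in_nodes(nodes, tag=None):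
--     # Stage 1: flatten everything into one stream of (key, value) pairs.
--     pairs = []
--     for node in nodes:
--         if "tags" in node:
--             for t, v in node["tags"].items():
--                 t = t.split(":")[0]
--                 if tag is None or t == tag:
--                     vals = v.split(";") if isinstance(v, str) else [str(v)]
--                     for val in vals:
--                         pairs.append((t, val))
--     # Stage 2: distinct keys in first-seen order.
--     keys = []
--     for t, _ in pairs:
--         if t not in keys:
--             keys.append(t)
--     # Stage 3: per key, scan the whole stream for its distinct values in order.
--     result = {}
--     for k in keys:
--         seen = []
--         for t, val in pairs:
--             if t == k and val not in seen:
--                 seen.append(val)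
--         result[k] = seen
--     return result
-- ===== Notes on version B (the rewrite author's own statement) =====
-- stated objective: alternative
-- what changed: B is a staged group-by: it first flattens all nodes into one stream of (key, value) pairs, then collects the distinct keys in first-seen order, then for each key re-scans the whole stream to collect its distinct values in order, only building the dict at the end; A builds the dict incrementally in a single pass with per-value membership and key-presence branching inside the traversal.
import Mathlib
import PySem

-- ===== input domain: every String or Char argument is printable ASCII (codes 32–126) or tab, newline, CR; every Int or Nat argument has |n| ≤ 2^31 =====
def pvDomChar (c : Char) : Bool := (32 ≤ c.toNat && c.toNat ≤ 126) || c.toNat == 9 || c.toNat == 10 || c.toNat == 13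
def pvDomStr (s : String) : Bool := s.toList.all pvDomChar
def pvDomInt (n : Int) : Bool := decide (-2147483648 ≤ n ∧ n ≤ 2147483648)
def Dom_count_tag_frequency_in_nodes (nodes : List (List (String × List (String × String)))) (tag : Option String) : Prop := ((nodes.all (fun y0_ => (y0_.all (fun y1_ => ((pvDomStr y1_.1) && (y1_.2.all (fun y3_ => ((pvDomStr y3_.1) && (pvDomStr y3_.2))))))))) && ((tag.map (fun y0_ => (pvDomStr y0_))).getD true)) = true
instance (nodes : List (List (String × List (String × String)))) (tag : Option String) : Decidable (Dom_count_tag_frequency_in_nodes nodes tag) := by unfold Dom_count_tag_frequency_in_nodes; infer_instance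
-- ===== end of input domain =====

-- B is a staged group-by over a flattened (key, value) stream (alternative decomposition, same
-- order of results); A builds the dict incrementally in one pass. Equality of RETURN values is
-- proved; neither side mutates its arguments. On this Lean domain every tag value is a string, so
-- only the `isinstance(v, str)` branch of A's add_value is reachable and ported.

-- ===== PORT A =====
-- per-value body of add_value's str branch (one iteration of `for value in values`)
def pvAStep (t : String) (tf : PySem.Dict String (List String)) (value : String) :
    PySem.Dict String (List String) :=
  if tf.contains t then
    if value ∈ tf.getD t [] then tf
    else tf.insert t (tf.getD t [] ++ [value])   -- tag_frequency[t].append(value)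
  else tf.insert t [value]

-- add_value(tag_frequency, t, v) for a str v (split? is total here: ";" ≠ "")
def pvAddValue (tf : PySem.Dict String (List String)) (t v : String) :
    PySem.Dict String (List String) :=
  ((PySem.Str.split? v ";").getD []).foldl (pvAStep t) tf

-- body of `for t, v in node["tags"].items()`
def pvATag (tag : Option String) (tf : PySem.Dict String (List String)) (tv : String × String) :
    PySem.Dict String (List String) :=
  let t := ((PySem.Str.split? tv.1 ":").getD []).headD ""   -- t.split(":")[0] (split is never empty)
  match tag with
  | none => pvAddValue tf t tv.2
  | some s => if t = s then pvAddValue tf t tv.2 else tf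

-- body of `for node in nodes` (membership test + lookup of "tags" as first match)
def pvANode (tag : Option String) (tf : PySem.Dict String (List String))
    (node : List (String × List (String × String))) : PySem.Dict String (List String) :=
  match (PySem.Dict.mk node).get? "tags" with
  | none => tf
  | some tags => tags.foldl (pvATag tag) tf

def count_tag_frequency_in_nodes (nodes : List (List (String × List (String × String)))) (tag : Option String) : List (String × List String) :=
  (nodes.foldl (pvANode tag) PySem.Dict.empty).items

-- ===== PORT B =====
-- `tag is None or t == tag`
def pvBKeep (tag : Option String) (t : String) : Bool :=
  match tag with
  | none => true
  | some s => t == s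

-- body of stage 1's tag loop: `for val in vals: pairs.append((t, val))` behind the filter
def pvBPairsTag (tag : Option String) (acc : List (String × String)) (tv : String × String) :
    List (String × String) :=
  let t := ((PySem.Str.split? tv.1 ":").getD []).headD ""
  if pvBKeep tag t then
    ((PySem.Str.split? tv.2 ";").getD []).foldl (fun acc val => acc ++ [(t, val)]) acc
  else acc

-- body of stage 1's node loop
def pvBPairsNode (tag : Option String) (acc : List (String × String))
    (node : List (String × List (String × String))) : List (String × String) :=
  match (PySem.Dict.mk node).get? "tags" with
  | none => acc
  | some tags => tags.foldl (pvBPairsTag tag) acc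

-- body of stage 2: `if t not in keys: keys.append(t)`
def pvBKeys (acc : List String) (p : String × String) : List String :=
  if p.1 ∈ acc then acc else acc ++ [p.1]

-- stage 3's inner scan: `if t == k and val not in seen: seen.append(val)`
def pvBGather (pairs : List (String × String)) (k : String) : List String :=
  pairs.foldl (fun seen p => if p.1 = k ∧ p.2 ∉ seen then seen ++ [p.2] else seen) []

def count_tag_frequency_in_nodes_alt (nodes : List (List (String × List (String × String)))) (tag : Option String) : List (String × List String) :=
  let pairs := nodes.foldl (pvBPairsNode tag) []
  let keys := pairs.foldl pvBKeys []
  (keys.foldl (fun d k => d.insert k (pvBGather pairs k)) PySem.Dict.empty).items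

-- ===== PRECONDITION & SPEC =====
def Spec_count_tag_frequency_in_nodes (nodes : List (List (String × List (String × String)))) (tag : Option String) (out : List (String × List String)) : Prop := out = count_tag_frequency_in_nodes_alt nodes tag
instance (nodes : List (List (String × List (String × String)))) (tag : Option String) (out : List (String × List String)) : Decidable (Spec_count_tag_frequency_in_nodes nodes tag out) := by unfold Spec_count_tag_frequency_in_nodes; infer_instance

-- ===== CLAIM (what is proved, stated in full; the proofs are below) =====
def Claim_equal_count_tag_frequency_in_nodes : Prop := ∀ (nodes : List (List (String × List (String × String)))) (tag : Option String), Dom_count_tag_frequency_in_nodes nodes tag → Spec_count_tag_frequency_in_nodes nodes tag (count_tag_frequency_in_nodes nodes tag)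

-- ===== LEMMAS AND PROOFS =====

-- canonical flattened stream both sides are related to
def pvTagPairs (tag : Option String) (tv : String × String) : List (String × String) :=
  let t := ((PySem.Str.split? tv.1 ":").getD []).headD ""
  if pvBKeep tag t then ((PySem.Str.split? tv.2 ";").getD []).map (fun v => (t, v)) else []

def pvNodePairs (tag : Option String) (node : List (String × List (String × String))) :
    List (String × String) :=
  match (PySem.Dict.mk node).get? "tags" with
  | none => []
  | some tags => tags.flatMap (pvTagPairs tag)

def pvPairs (nodes : List (List (String × List (String × String)))) (tag : Option String) :
    List (String × String) :=
  nodes.flatMap (pvNodePairs tag)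

-- the pair-at-a-time version of A's update
def pvStep (d : PySem.Dict String (List String)) (p : String × String) :
    PySem.Dict String (List String) :=
  pvAStep p.1 d p.2

-- generic: an append-accumulating fold is acc ++ flatMap
lemma pv_foldl_append {α β : Type} (g : β → List α) (l : List β) :
    ∀ acc : List α, l.foldl (fun acc x => acc ++ g x) acc = acc ++ l.flatMap g := by
  induction l with
  | nil => intro acc; simp
  | cons x xs ih => intro acc; simp [List.foldl_cons, ih, List.flatMap_cons]

-- generic: two folds with pointwise-equal bodies agree
lemma pv_foldl_congr {α β : Type} {f g : α → β → α} {l : List β}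
    (h : ∀ d x, f d x = g d x) : ∀ d, l.foldl f d = l.foldl g d := by
  induction l with
  | nil => intro d; rfl
  | cons x xs ih => intro d; rw [List.foldl_cons, List.foldl_cons, h, ih]

-- generic: folding over a flatMap is nested folding
lemma pv_foldl_flatMap {α β : Type} (f : α → β → α) (g : γ → List β) (l : List γ) :
    ∀ d : α, (l.flatMap g).foldl f d = l.foldl (fun d x => (g x).foldl f d) d := by
  induction l with
  | nil => intro d; simp
  | cons x xs ih => intro d; simp [List.flatMap_cons, List.foldl_append, ih]

-- ---- B's stage 1 builds pvPairs ----
lemma pvBPairsTag_eq (tag : Option String) (acc : List (String × String)) (tv : String × String) :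
    pvBPairsTag tag acc tv = acc ++ pvTagPairs tag tv := by
  unfold pvBPairsTag pvTagPairs
  dsimp only
  split
  · rw [pv_foldl_append (fun val => [(((PySem.Str.split? tv.1 ":").getD []).headD "", val)])]
    rw [← List.map_eq_flatMap]
  · simp

lemma pvBPairs_tags (tag : Option String) (tags : List (String × String)) :
    ∀ acc, tags.foldl (pvBPairsTag tag) acc = acc ++ tags.flatMap (pvTagPairs tag) := by
  induction tags with
  | nil => intro acc; simp
  | cons tv rest ih =>
    intro acc
    simp [List.foldl_cons, pvBPairsTag_eq, ih, List.flatMap_cons]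

lemma pvBPairsNode_eq (tag : Option String) (acc : List (String × String))
    (node : List (String × List (String × String))) :
    pvBPairsNode tag acc node = acc ++ pvNodePairs tag node := by
  unfold pvBPairsNode pvNodePairs
  cases (PySem.Dict.mk node).get? "tags" with
  | none => simp
  | some tags => exact pvBPairs_tags tag tags acc

lemma pvBPairs_eq (tag : Option String) (nodes : List (List (String × List (String × String)))) :
    ∀ acc, nodes.foldl (pvBPairsNode tag) acc = acc ++ pvPairs nodes tag := by
  induction nodes with
  | nil => intro acc; simp [pvPairs]
  | cons node rest ih =>
    intro acc
    simp only [List.foldl_cons, pvBPairsNode_eq, ih, pvPairs, List.flatMap_cons, List.append_assoc]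

-- ---- A's nested loops are a fold of pvStep over pvPairs ----
lemma pvAddValue_eq (tf : PySem.Dict String (List String)) (t v : String) :
    pvAddValue tf t v
      = (((PySem.Str.split? v ";").getD []).map (fun val => (t, val))).foldl pvStep tf := by
  unfold pvAddValue
  rw [List.foldl_map]
  rfl

lemma pvATag_eq (tag : Option String) (tf : PySem.Dict String (List String))
    (tv : String × String) : pvATag tag tf tv = (pvTagPairs tag tv).foldl pvStep tf := by
  unfold pvATag pvTagPairs
  cases tag with
  | none => simp [pvBKeep, pvAddValue_eq]
  | some s =>
    dsimp only
    simp only [pvBKeep, beq_iff_eq, pvAddValue_eq]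
    split
    · rfl
    · rfl

lemma pvANode_eq (tag : Option String) (tf : PySem.Dict String (List String))
    (node : List (String × List (String × String))) :
    pvANode tag tf node = (pvNodePairs tag node).foldl pvStep tf := by
  unfold pvANode pvNodePairs
  cases (PySem.Dict.mk node).get? "tags" with
  | none => rfl
  | some tags =>
    rw [pv_foldl_flatMap]
    exact pv_foldl_congr (fun d tv => pvATag_eq tag d tv) tf

lemma pvA_eq (tag : Option String) (nodes : List (List (String × List (String × String)))) :
    ∀ d, nodes.foldl (pvANode tag) d = (pvPairs nodes tag).foldl pvStep d := by
  induction nodes with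
  | nil => intro d; simp [pvPairs]
  | cons node rest ih =>
    intro d
    simp only [List.foldl_cons, pvPairs, List.flatMap_cons, List.foldl_append, pvANode_eq, ih]

-- ---- characterizing the pvStep fold: keys, nodup, buckets ----
lemma pvStep_keys (d : PySem.Dict String (List String)) (p : String × String) :
    (pvStep d p).keys = pvBKeys d.keys p := by
  unfold pvStep pvAStep pvBKeys
  cases hc : d.contains p.1 with
  | true =>
    have hm : p.1 ∈ d.keys := by
      rw [PySem.Dict.contains_eq_decide_mem_keys] at hc; simpa using hc
    by_cases hv : p.2 ∈ d.getD p.1 []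
    · simp [hv, hm]
    · simp [hv, hm, PySem.Dict.keys_insert_of_contains d _ hc]
  | false =>
    have hm : p.1 ∉ d.keys := by
      rw [PySem.Dict.contains_eq_decide_mem_keys] at hc; simpa using hc
    simp [hm, PySem.Dict.keys_insert_of_not_contains d _ hc]

lemma pvFold_keys (ps : List (String × String)) :
    ∀ d : PySem.Dict String (List String),
      (ps.foldl pvStep d).keys = ps.foldl pvBKeys d.keys := by
  induction ps with
  | nil => intro d; rfl
  | cons p rest ih => intro d; simp [List.foldl_cons, ih, pvStep_keys]

lemma pvStep_nodup (d : PySem.Dict String (List String)) (p : String × String)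
    (h : d.keys.Nodup) : (pvStep d p).keys.Nodup := by
  unfold pvStep pvAStep
  split
  · split
    · exact h
    · exact PySem.Dict.nodup_keys_insert d _ _ h
  · exact PySem.Dict.nodup_keys_insert d _ _ h

lemma pvFold_nodup (ps : List (String × String)) :
    ∀ d : PySem.Dict String (List String), d.keys.Nodup → (ps.foldl pvStep d).keys.Nodup := by
  induction ps with
  | nil => intro d h; exact h
  | cons p rest ih => intro d h; exact ih _ (pvStep_nodup d p h)

lemma pvStep_getD (d : PySem.Dict String (List String)) (p : String × String) (k : String) :
    (pvStep d p).getD k []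
      = if p.1 = k ∧ p.2 ∉ d.getD k [] then d.getD k [] ++ [p.2] else d.getD k [] := by
  unfold pvStep pvAStep
  by_cases hk : p.1 = k
  · subst hk
    cases hc : d.contains p.1 with
    | true =>
      by_cases hv : p.2 ∈ d.getD p.1 []
      · simp [hv]
      · simp [hv, PySem.Dict.getD_insert_self]
    | false =>
      have hg : d.getD p.1 [] = [] := PySem.Dict.getD_of_not_contains d [] hc
      simp [hg, PySem.Dict.getD_insert_self]
  · cases hc : d.contains p.1 with
    | true =>
      by_cases hv : p.2 ∈ d.getD p.1 []
      · simp [hv, hk]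
      · rw [if_pos rfl, if_neg hv, PySem.Dict.getD_insert,
            if_neg (fun h : k = p.1 => hk h.symm), if_neg (fun h => hk h.1)]
    | false =>
      rw [if_neg (by simp), PySem.Dict.getD_insert,
          if_neg (fun h : k = p.1 => hk h.symm), if_neg (fun h => hk h.1)]

lemma pvFold_getD (ps : List (String × String)) (k : String) :
    ∀ d : PySem.Dict String (List String),
      (ps.foldl pvStep d).getD k []
        = ps.foldl (fun seen p => if p.1 = k ∧ p.2 ∉ seen then seen ++ [p.2] else seen)
            (d.getD k []) := by
  induction ps with
  | nil => intro d; rfl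
  | cons p rest ih => intro d; simp only [List.foldl_cons, ih, pvStep_getD]

-- ===== VERDICT (by name: the statement is the Claim_ definition above) =====
theorem count_tag_frequency_in_nodes_spec : Claim_equal_count_tag_frequency_in_nodes := by
  intro nodes tag _
  show count_tag_frequency_in_nodes nodes tag = count_tag_frequency_in_nodes_alt nodes tag
  unfold count_tag_frequency_in_nodes count_tag_frequency_in_nodes_alt
  rw [pvA_eq, pvBPairs_eq]
  simp only [List.nil_append]
  set ps := pvPairs nodes tag with hps
  set keys := ps.foldl pvBKeys [] with hkeys
  have hnA : (ps.foldl pvStep PySem.Dict.empty).keys.Nodup :=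
    pvFold_nodup ps PySem.Dict.empty (by simp)
  have hkA : (ps.foldl pvStep PySem.Dict.empty).keys = keys := by
    rw [pvFold_keys]; simp [hkeys]
  have hkn : keys.Nodup := hkA ▸ hnA
  -- A's items via keys + buckets
  have hA : (ps.foldl pvStep PySem.Dict.empty).items
      = keys.map (fun k => (k, pvBGather ps k)) := by
    rw [PySem.Dict.items_eq_map_keys _ hnA [], hkA]
    refine List.map_congr_left (fun k _ => ?_)
    rw [pvFold_getD]
    rfl
  -- B's items: fresh distinct keys appended to the empty dict
  have hB : (keys.foldl (fun d k => d.insert k (pvBGather ps k)) PySem.Dict.empty).items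
      = keys.map (fun k => (k, pvBGather ps k)) := by
    rw [PySem.Dict.items_foldl_insert_fresh (k := fun x => x) (v := fun x => pvBGather ps x)
      (d := PySem.Dict.empty) (l := keys) (by intro a _; simp) (by simpa using hkn)]
    simp [PySem.Dict.empty]
  rw [hA, hB]
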